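-- pv_equiv track=rewrite | github.com/user1689/91_leetcode_memo | review/Banana/amazonOA/Mini_Moves.py | miniMoves
-- ===== SOURCE A (Python) =====
-- from typing import List
--
-- def miniMoves(arr: List[int]) -> int:
--     n = len(arr)
--     cntZero = 0
--     cntOne = 0
--     ans1 = 0
--     for i in range(0, n):
--         if (arr[i] == 1):
--             cntOne+=1
--         else:
--             ans1+=cntOne
--
--     ans2 = 0
--     for j in range(0, n):
--         if (arr[j] == 0):
--             cntZero+=1
--         else:
--             ans2+=cntZero
--
--
--     ans = ans1 if ans1 < ans2 else ans2
--     return ans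
-- ===== SOURCE B (Python) =====
-- from typing import List
--
-- def miniMoves(arr: List[int]) -> int:
--     # Closed form from positions: each 1 must hop over every later non-1 element
--     # (ans1), each 0 over every earlier non-0 element, i.e. each 0 over every
--     # later non-0 when gathered the other way (ans2).  For k marks at positions
--     # ps, sum of "later non-marks" = k*(n-1) - sum(ps) - k*(k-1)//2.
--     n = len(arr)
--     ones = [i for i, x in enumerate(arr) if x == 1]
--     zeros = [i for i, x in enumerate(arr) if x == 0]
--     k, m = len(ones), len(zeros)
--     ans1 = k * (n - 1) - sum(ones) - k * (k - 1) // 2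
--     ans2 = m * (n - 1) - sum(zeros) - m * (m - 1) // 2
--     return min(ans1, ans2)
-- ===== Notes on version B (the rewrite author's own statement) =====
-- stated objective: alternative
-- what changed: A accumulates both inversion counts with two separate counting scans; B collects the positions of the 1s and of the 0s and computes each count by the closed-form identity sum-of-later-others = k*(n-1) - sum(positions) - k*(k-1)/2, with no inversion accumulation at all.
import Mathlib
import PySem

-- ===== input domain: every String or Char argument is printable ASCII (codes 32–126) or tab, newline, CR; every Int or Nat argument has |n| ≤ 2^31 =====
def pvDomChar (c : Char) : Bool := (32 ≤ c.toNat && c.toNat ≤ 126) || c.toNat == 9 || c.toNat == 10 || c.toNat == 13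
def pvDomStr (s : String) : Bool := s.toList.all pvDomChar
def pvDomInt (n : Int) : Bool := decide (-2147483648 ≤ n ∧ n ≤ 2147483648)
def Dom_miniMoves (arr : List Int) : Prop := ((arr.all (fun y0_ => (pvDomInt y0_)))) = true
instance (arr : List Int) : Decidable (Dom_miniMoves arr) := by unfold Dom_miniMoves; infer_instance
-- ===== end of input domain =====

-- B replaces A's two counting scans by a closed form over the positions of the 1s and 0s; objective: alternative.

-- ===== PORT A =====
-- first loop of A: state (cntOne, ans1)
def miniMovesLoop1 (s : Int × Int) (x : Int) : Int × Int :=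
  if x = 1 then (s.1 + 1, s.2) else (s.1, s.2 + s.1)

-- second loop of A: state (cntZero, ans2)
def miniMovesLoop2 (s : Int × Int) (x : Int) : Int × Int :=
  if x = 0 then (s.1 + 1, s.2) else (s.1, s.2 + s.1)

def miniMoves (arr : List Int) : Int :=
  let r1 := arr.foldl miniMovesLoop1 (0, 0)
  let r2 := arr.foldl miniMovesLoop2 (0, 0)
  if r1.2 < r2.2 then r1.2 else r2.2

-- ===== PORT B =====
def miniMoves_alt (arr : List Int) : Int :=
  let n : Int := arr.length
  let ones := ((PySem.List.enumerate arr).filter (fun p => p.2 == 1)).map (fun p => p.1)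
  let zeros := ((PySem.List.enumerate arr).filter (fun p => p.2 == 0)).map (fun p => p.1)
  let k : Int := ones.length
  let m : Int := zeros.length
  let ans1 := k * (n - 1) - ones.sum - PySem.Int.floordiv (k * (k - 1)) 2
  let ans2 := m * (n - 1) - zeros.sum - PySem.Int.floordiv (m * (m - 1)) 2
  min ans1 ans2

-- ===== PRECONDITION & SPEC =====
def Spec_miniMoves (arr : List Int) (out : Int) : Prop := out = miniMoves_alt arr
instance (arr : List Int) (out : Int) : Decidable (Spec_miniMoves arr out) := by unfold Spec_miniMoves; infer_instance

-- ===== CLAIM =====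
def Claim_equal_miniMoves : Prop := ∀ (arr : List Int), Dom_miniMoves arr → Spec_miniMoves arr (miniMoves arr)

-- ===== LEMMAS AND PROOFS =====
-- number of occurrences of v, as an Int
def cntEq (v : Int) (l : List Int) : Int := ((l.filter (fun x => x == v)).length : Int)

-- sum of the positions of the occurrences of v, positions starting at s
def idxSum (v : Int) (l : List Int) (s : Int) : Int :=
  (((PySem.List.enumerate l s).filter (fun p => p.2 == v)).map (fun p => p.1)).sum

theorem cntEq_cons (v x : Int) (l : List Int) :
    cntEq v (x :: l) = (if x = v then 1 else 0) + cntEq v l := by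
  unfold cntEq
  by_cases h : x = v <;> simp [h, List.filter_cons]
  omega

theorem idxSum_cons (v x : Int) (l : List Int) (s : Int) :
    idxSum v (x :: l) s = (if x = v then s else 0) + idxSum v l (s + 1) := by
  unfold idxSum
  rw [PySem.List.enumerate_cons]
  by_cases h : x = v <;> simp [h, List.filter_cons]

theorem enumFilterLen (v : Int) (l : List Int) (s : Int) :
    ((((PySem.List.enumerate l s).filter (fun p => p.2 == v)).map (fun p => p.1)).length : Int)
      = cntEq v l := by
  induction l generalizing s with
  | nil => simp [cntEq, PySem.List.enumerate_nil]
  | cons x xs ih =>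
    rw [PySem.List.enumerate_cons, cntEq_cons]
    by_cases h : x = v <;> simp [h, List.filter_cons, ← ih (s + 1)] <;> omega

-- the generic counting scan of A, characterised by cntEq and idxSum
theorem loopChar (v : Int) (l : List Int) :
    ∀ (s o a : Int),
      (l.foldl (fun (st : Int × Int) (x : Int) =>
          if x = v then (st.1 + 1, st.2) else (st.1, st.2 + st.1)) (o, a)).1
        = o + cntEq v l ∧
      2 * (l.foldl (fun (st : Int × Int) (x : Int) =>
          if x = v then (st.1 + 1, st.2) else (st.1, st.2 + st.1)) (o, a)).2
        = 2 * a + 2 * o * ((l.length : Int) - cntEq v l)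
          + 2 * cntEq v l * (s + (l.length : Int) - 1) - 2 * idxSum v l s
          - cntEq v l * (cntEq v l - 1) := by
  induction l with
  | nil => intro s o a; simp [cntEq, idxSum, PySem.List.enumerate_nil]; try ring
  | cons x xs ih =>
    intro s o a
    rw [cntEq_cons, idxSum_cons]
    by_cases h : x = v
    · obtain ⟨h1, h2⟩ := ih (s + 1) (o + 1) a
      simp only [List.foldl_cons, if_pos h, h1, h2]
      constructor
      · ring
      · simp only [List.length_cons]
        push_cast
        ring
    · obtain ⟨h1, h2⟩ := ih (s + 1) o (a + o)
      simp only [List.foldl_cons, if_neg h, h1, h2]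
      constructor
      · ring
      · simp only [List.length_cons]
        push_cast
        ring

theorem floordiv_two_double (t : Int) : PySem.Int.floordiv (2 * t) 2 = t := by
  rw [PySem.Int.floordiv_eq_ediv_of_pos (by norm_num)]
  omega

theorem scan_eq_closed (v : Int) (arr : List Int)
    (step : Int × Int → Int → Int × Int)
    (hstep : step = fun st x => if x = v then (st.1 + 1, st.2) else (st.1, st.2 + st.1)) :
    (arr.foldl step (0, 0)).2
      = cntEq v arr * ((arr.length : Int) - 1)
        - (((PySem.List.enumerate arr).filter (fun p => p.2 == v)).map (fun p => p.1)).sum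
        - PySem.Int.floordiv (cntEq v arr * (cntEq v arr - 1)) 2 := by
  subst hstep
  obtain ⟨-, h2⟩ := loopChar v arr 0 0 0
  have hS : (((PySem.List.enumerate arr).filter (fun p => p.2 == v)).map (fun p => p.1)).sum
      = idxSum v arr 0 := rfl
  rw [hS]
  have hkk : cntEq v arr * (cntEq v arr - 1)
      = 2 * (cntEq v arr * ((arr.length : Int) - 1) - idxSum v arr 0
             - (arr.foldl (fun (st : Int × Int) (x : Int) =>
                 if x = v then (st.1 + 1, st.2) else (st.1, st.2 + st.1)) (0, 0)).2) := by
    linarith [h2]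
  rw [hkk, floordiv_two_double]
  ring

-- ===== VERDICT =====
theorem miniMoves_spec : Claim_equal_miniMoves := by
  intro arr _
  unfold Spec_miniMoves miniMoves miniMoves_alt
  have e1 := scan_eq_closed 1 arr miniMovesLoop1 (by funext st x; rfl)
  have e2 := scan_eq_closed 0 arr miniMovesLoop2 (by funext st x; rfl)
  simp only [e1, e2, enumFilterLen, min_def]
  split_ifs <;> omega
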